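-- pv_equiv track=rewrite | github.com/sanjay51318/benchsync | simple_backend.py | infer_roles_from_skills
-- ===== SOURCE A (Python) =====
-- def infer_roles_from_skills(skills: list):
--     """Infer possible roles based on skills"""
--     skills_lower = [skill.lower() for skill in skills]
--     roles = []
--
--     if any(skill in skills_lower for skill in ['react', 'angular', 'vue.js', 'html', 'css', 'javascript']):
--         roles.append('Frontend Developer')
--
--     if any(skill in skills_lower for skill in ['python', 'java', 'node.js', 'sql', 'postgresql']):
--         roles.append('Backend Developer')
--
--     if any(skill in skills_lower for skill in ['react', 'angular']) and any(skill in skills_lower for skill in ['python', 'java', 'node.js']):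
--         roles.append('Full Stack Developer')
--
--     if any(skill in skills_lower for skill in ['aws', 'azure', 'docker', 'kubernetes', 'jenkins']):
--         roles.append('DevOps Engineer')
--
--     if any(skill in skills_lower for skill in ['machine learning', 'ai', 'data science', 'tensorflow', 'pytorch']):
--         roles.append('Data Scientist')
--
--     return roles if roles else ['Software Developer']
-- ===== SOURCE B (Python) =====
-- # Inverted index: each known skill keyword maps to a bitmask of the keyword
-- # groups it belongs to (bit0 frontend, bit1 backend, bit2 react/angular,
-- # bit3 python/java/node.js, bit4 devops, bit5 data-science).  One pass over
-- # the input skills ORs the masks together; each role then needs its required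
-- # bits set (Full Stack needs bits 2 and 3).
-- SKILL_MASKS = {
--     'react': 0b000101, 'angular': 0b000101,
--     'vue.js': 0b000001, 'html': 0b000001, 'css': 0b000001, 'javascript': 0b000001,
--     'python': 0b001010, 'java': 0b001010, 'node.js': 0b001010,
--     'sql': 0b000010, 'postgresql': 0b000010,
--     'aws': 0b010000, 'azure': 0b010000, 'docker': 0b010000,
--     'kubernetes': 0b010000, 'jenkins': 0b010000,
--     'machine learning': 0b100000, 'ai': 0b100000, 'data science': 0b100000,
--     'tensorflow': 0b100000, 'pytorch': 0b100000,
-- }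
--
-- ROLE_REQS = [
--     ('Frontend Developer', 0b000001),
--     ('Backend Developer', 0b000010),
--     ('Full Stack Developer', 0b001100),
--     ('DevOps Engineer', 0b010000),
--     ('Data Scientist', 0b100000),
-- ]
--
--
-- def infer_roles_from_skills(skills: list):
--     """Infer possible roles based on skills (inverted index + bitmask)."""
--     mask = 0
--     for skill in skills:
--         mask |= SKILL_MASKS.get(skill.lower(), 0)
--     roles = [role for role, req in ROLE_REQS if mask & req == req]
--     return roles if roles else ['Software Developer']
-- ===== Notes on version B (the rewrite author's own statement) =====
-- stated objective: faster
-- what changed: Replaces A's five per-role scans of keyword lists against the lowered skills by an inverted index (keyword -> group bitmask): one pass over the input skills ORs dict-looked-up masks into a single integer, and each role is emitted iff its required bits are set.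
import Mathlib
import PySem

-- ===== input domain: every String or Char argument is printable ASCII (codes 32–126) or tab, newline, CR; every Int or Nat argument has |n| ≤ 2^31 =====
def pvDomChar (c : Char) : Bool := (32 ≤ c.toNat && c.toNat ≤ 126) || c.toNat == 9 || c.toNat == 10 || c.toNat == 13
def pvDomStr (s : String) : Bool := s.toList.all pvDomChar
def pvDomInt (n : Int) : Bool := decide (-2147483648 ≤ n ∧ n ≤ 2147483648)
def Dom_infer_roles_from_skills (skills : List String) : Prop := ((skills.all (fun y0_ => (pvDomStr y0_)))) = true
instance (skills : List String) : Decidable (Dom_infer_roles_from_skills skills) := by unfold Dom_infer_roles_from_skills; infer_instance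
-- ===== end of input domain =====

-- B replaces A's five per-role keyword-list scans by an inverted index
-- (keyword -> group bitmask) folded over the skills in one pass; roles are read
-- off the accumulated bitmask (objective: faster in a timing run; same return value).

-- ===== PORT A =====
def infer_roles_from_skills (skills : List String) : List String :=
  let skills_lower := skills.map PySem.Str.lower
  let roles : List String := []
  let roles := if ["react", "angular", "vue.js", "html", "css", "javascript"].any
      (fun skill => skills_lower.contains skill) then roles ++ ["Frontend Developer"] else roles
  let roles := if ["python", "java", "node.js", "sql", "postgresql"].any
      (fun skill => skills_lower.contains skill) then roles ++ ["Backend Developer"] else roles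
  let roles := if (["react", "angular"].any (fun skill => skills_lower.contains skill) &&
      ["python", "java", "node.js"].any (fun skill => skills_lower.contains skill)) then
      roles ++ ["Full Stack Developer"] else roles
  let roles := if ["aws", "azure", "docker", "kubernetes", "jenkins"].any
      (fun skill => skills_lower.contains skill) then roles ++ ["DevOps Engineer"] else roles
  let roles := if ["machine learning", "ai", "data science", "tensorflow", "pytorch"].any
      (fun skill => skills_lower.contains skill) then roles ++ ["Data Scientist"] else roles
  if roles = [] then ["Software Developer"] else roles

-- ===== PORT B =====
-- mask values are non-negative Python int literals; ported as Nat with |||/&&&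
def skillMasks : PySem.Dict String Nat :=
  PySem.Dict.ofList
    [("react", 5), ("angular", 5),
     ("vue.js", 1), ("html", 1), ("css", 1), ("javascript", 1),
     ("python", 10), ("java", 10), ("node.js", 10),
     ("sql", 2), ("postgresql", 2),
     ("aws", 16), ("azure", 16), ("docker", 16), ("kubernetes", 16), ("jenkins", 16),
     ("machine learning", 32), ("ai", 32), ("data science", 32),
     ("tensorflow", 32), ("pytorch", 32)]

def roleReqs : List (String × Nat) :=
  [("Frontend Developer", 1), ("Backend Developer", 2), ("Full Stack Developer", 12),
   ("DevOps Engineer", 16), ("Data Scientist", 32)]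

def infer_roles_from_skills_alt (skills : List String) : List String :=
  let mask := skills.foldl (fun m skill => m ||| skillMasks.getD (PySem.Str.lower skill) 0) 0
  let roles := roleReqs.filterMap (fun rr => if mask &&& rr.2 == rr.2 then some rr.1 else none)
  if roles = [] then ["Software Developer"] else roles

-- ===== PRECONDITION & SPEC =====
def Spec_infer_roles_from_skills (skills : List String) (out : List String) : Prop := out = infer_roles_from_skills_alt skills
instance (skills : List String) (out : List String) : Decidable (Spec_infer_roles_from_skills skills out) := by unfold Spec_infer_roles_from_skills; infer_instance

-- ===== CLAIM (what is proved, stated in full; the proofs are below) =====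
def Claim_equal_infer_roles_from_skills : Prop := ∀ (skills : List String), Dom_infer_roles_from_skills skills → Spec_infer_roles_from_skills skills (infer_roles_from_skills skills)

-- ===== LEMMAS AND PROOFS =====

-- the dict literal, in mk form
theorem skillMasks_eq : skillMasks = PySem.Dict.mk
    [("react", 5), ("angular", 5),
     ("vue.js", 1), ("html", 1), ("css", 1), ("javascript", 1),
     ("python", 10), ("java", 10), ("node.js", 10),
     ("sql", 2), ("postgresql", 2),
     ("aws", 16), ("azure", 16), ("docker", 16), ("kubernetes", 16), ("jenkins", 16),
     ("machine learning", 32), ("ai", 32), ("data science", 32),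
     ("tensorflow", 32), ("pytorch", 32)] := by decide

-- dict lookup as a case split on the 21 keyword literals
theorem getD_skillMasks (x : String) : skillMasks.getD x 0 =
    (if x == "react" then 5 else if x == "angular" then 5 else if x == "vue.js" then 1 else if x == "html" then 1 else if x == "css" then 1 else if x == "javascript" then 1 else if x == "python" then 10 else if x == "java" then 10 else if x == "node.js" then 10 else if x == "sql" then 2 else if x == "postgresql" then 2 else if x == "aws" then 16 else if x == "azure" then 16 else if x == "docker" then 16 else if x == "kubernetes" then 16 else if x == "jenkins" then 16 else if x == "machine learning" then 32 else if x == "ai" then 32 else if x == "data science" then 32 else if x == "tensorflow" then 32 else if x == "pytorch" then 32 else 0) := by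
  by_cases h0 : x = "react"
  · subst h0; decide
  by_cases h1 : x = "angular"
  · subst h1; decide
  by_cases h2 : x = "vue.js"
  · subst h2; decide
  by_cases h3 : x = "html"
  · subst h3; decide
  by_cases h4 : x = "css"
  · subst h4; decide
  by_cases h5 : x = "javascript"
  · subst h5; decide
  by_cases h6 : x = "python"
  · subst h6; decide
  by_cases h7 : x = "java"
  · subst h7; decide
  by_cases h8 : x = "node.js"
  · subst h8; decide
  by_cases h9 : x = "sql"
  · subst h9; decide
  by_cases h10 : x = "postgresql"
  · subst h10; decide
  by_cases h11 : x = "aws"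
  · subst h11; decide
  by_cases h12 : x = "azure"
  · subst h12; decide
  by_cases h13 : x = "docker"
  · subst h13; decide
  by_cases h14 : x = "kubernetes"
  · subst h14; decide
  by_cases h15 : x = "jenkins"
  · subst h15; decide
  by_cases h16 : x = "machine learning"
  · subst h16; decide
  by_cases h17 : x = "ai"
  · subst h17; decide
  by_cases h18 : x = "data science"
  · subst h18; decide
  by_cases h19 : x = "tensorflow"
  · subst h19; decide
  by_cases h20 : x = "pytorch"
  · subst h20; decide
  have e0 : (x == "react") = false := beq_eq_false_iff_ne.mpr h0
  have f0 : ("react" == x) = false := beq_eq_false_iff_ne.mpr (Ne.symm h0)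
  have e1 : (x == "angular") = false := beq_eq_false_iff_ne.mpr h1
  have f1 : ("angular" == x) = false := beq_eq_false_iff_ne.mpr (Ne.symm h1)
  have e2 : (x == "vue.js") = false := beq_eq_false_iff_ne.mpr h2
  have f2 : ("vue.js" == x) = false := beq_eq_false_iff_ne.mpr (Ne.symm h2)
  have e3 : (x == "html") = false := beq_eq_false_iff_ne.mpr h3
  have f3 : ("html" == x) = false := beq_eq_false_iff_ne.mpr (Ne.symm h3)
  have e4 : (x == "css") = false := beq_eq_false_iff_ne.mpr h4
  have f4 : ("css" == x) = false := beq_eq_false_iff_ne.mpr (Ne.symm h4)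
  have e5 : (x == "javascript") = false := beq_eq_false_iff_ne.mpr h5
  have f5 : ("javascript" == x) = false := beq_eq_false_iff_ne.mpr (Ne.symm h5)
  have e6 : (x == "python") = false := beq_eq_false_iff_ne.mpr h6
  have f6 : ("python" == x) = false := beq_eq_false_iff_ne.mpr (Ne.symm h6)
  have e7 : (x == "java") = false := beq_eq_false_iff_ne.mpr h7
  have f7 : ("java" == x) = false := beq_eq_false_iff_ne.mpr (Ne.symm h7)
  have e8 : (x == "node.js") = false := beq_eq_false_iff_ne.mpr h8
  have f8 : ("node.js" == x) = false := beq_eq_false_iff_ne.mpr (Ne.symm h8)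
  have e9 : (x == "sql") = false := beq_eq_false_iff_ne.mpr h9
  have f9 : ("sql" == x) = false := beq_eq_false_iff_ne.mpr (Ne.symm h9)
  have e10 : (x == "postgresql") = false := beq_eq_false_iff_ne.mpr h10
  have f10 : ("postgresql" == x) = false := beq_eq_false_iff_ne.mpr (Ne.symm h10)
  have e11 : (x == "aws") = false := beq_eq_false_iff_ne.mpr h11
  have f11 : ("aws" == x) = false := beq_eq_false_iff_ne.mpr (Ne.symm h11)
  have e12 : (x == "azure") = false := beq_eq_false_iff_ne.mpr h12
  have f12 : ("azure" == x) = false := beq_eq_false_iff_ne.mpr (Ne.symm h12)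
  have e13 : (x == "docker") = false := beq_eq_false_iff_ne.mpr h13
  have f13 : ("docker" == x) = false := beq_eq_false_iff_ne.mpr (Ne.symm h13)
  have e14 : (x == "kubernetes") = false := beq_eq_false_iff_ne.mpr h14
  have f14 : ("kubernetes" == x) = false := beq_eq_false_iff_ne.mpr (Ne.symm h14)
  have e15 : (x == "jenkins") = false := beq_eq_false_iff_ne.mpr h15
  have f15 : ("jenkins" == x) = false := beq_eq_false_iff_ne.mpr (Ne.symm h15)
  have e16 : (x == "machine learning") = false := beq_eq_false_iff_ne.mpr h16
  have f16 : ("machine learning" == x) = false := beq_eq_false_iff_ne.mpr (Ne.symm h16)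
  have e17 : (x == "ai") = false := beq_eq_false_iff_ne.mpr h17
  have f17 : ("ai" == x) = false := beq_eq_false_iff_ne.mpr (Ne.symm h17)
  have e18 : (x == "data science") = false := beq_eq_false_iff_ne.mpr h18
  have f18 : ("data science" == x) = false := beq_eq_false_iff_ne.mpr (Ne.symm h18)
  have e19 : (x == "tensorflow") = false := beq_eq_false_iff_ne.mpr h19
  have f19 : ("tensorflow" == x) = false := beq_eq_false_iff_ne.mpr (Ne.symm h19)
  have e20 : (x == "pytorch") = false := beq_eq_false_iff_ne.mpr h20
  have f20 : ("pytorch" == x) = false := beq_eq_false_iff_ne.mpr (Ne.symm h20)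
  simp only [skillMasks_eq, PySem.Dict.getD_eq_get?_getD, PySem.Dict.get?_mk_cons, e0, f0, e1, f1, e2, f2, e3, f3, e4, f4, e5, f5, e6, f6, e7, f7, e8, f8, e9, f9, e10, f10, e11, f11, e12, f12, e13, f13, e14, f14, e15, f15, e16, f16, e17, f17, e18, f18, e19, f19, e20, f20,
    Bool.false_eq_true, ite_false]
  simp [PySem.Dict.get?]

theorem maskBit0 (x : String) : ((skillMasks.getD x 0).testBit 0) =
    (x == "react" || x == "angular" || x == "vue.js" || x == "html" || x == "css" || x == "javascript") := by
  by_cases h0 : x = "react"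
  · subst h0; decide
  by_cases h1 : x = "angular"
  · subst h1; decide
  by_cases h2 : x = "vue.js"
  · subst h2; decide
  by_cases h3 : x = "html"
  · subst h3; decide
  by_cases h4 : x = "css"
  · subst h4; decide
  by_cases h5 : x = "javascript"
  · subst h5; decide
  by_cases h6 : x = "python"
  · subst h6; decide
  by_cases h7 : x = "java"
  · subst h7; decide
  by_cases h8 : x = "node.js"
  · subst h8; decide
  by_cases h9 : x = "sql"
  · subst h9; decide
  by_cases h10 : x = "postgresql"
  · subst h10; decide
  by_cases h11 : x = "aws"
  · subst h11; decide
  by_cases h12 : x = "azure"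
  · subst h12; decide
  by_cases h13 : x = "docker"
  · subst h13; decide
  by_cases h14 : x = "kubernetes"
  · subst h14; decide
  by_cases h15 : x = "jenkins"
  · subst h15; decide
  by_cases h16 : x = "machine learning"
  · subst h16; decide
  by_cases h17 : x = "ai"
  · subst h17; decide
  by_cases h18 : x = "data science"
  · subst h18; decide
  by_cases h19 : x = "tensorflow"
  · subst h19; decide
  by_cases h20 : x = "pytorch"
  · subst h20; decide
  have e0 : (x == "react") = false := beq_eq_false_iff_ne.mpr h0
  have e1 : (x == "angular") = false := beq_eq_false_iff_ne.mpr h1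
  have e2 : (x == "vue.js") = false := beq_eq_false_iff_ne.mpr h2
  have e3 : (x == "html") = false := beq_eq_false_iff_ne.mpr h3
  have e4 : (x == "css") = false := beq_eq_false_iff_ne.mpr h4
  have e5 : (x == "javascript") = false := beq_eq_false_iff_ne.mpr h5
  have e6 : (x == "python") = false := beq_eq_false_iff_ne.mpr h6
  have e7 : (x == "java") = false := beq_eq_false_iff_ne.mpr h7
  have e8 : (x == "node.js") = false := beq_eq_false_iff_ne.mpr h8
  have e9 : (x == "sql") = false := beq_eq_false_iff_ne.mpr h9
  have e10 : (x == "postgresql") = false := beq_eq_false_iff_ne.mpr h10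
  have e11 : (x == "aws") = false := beq_eq_false_iff_ne.mpr h11
  have e12 : (x == "azure") = false := beq_eq_false_iff_ne.mpr h12
  have e13 : (x == "docker") = false := beq_eq_false_iff_ne.mpr h13
  have e14 : (x == "kubernetes") = false := beq_eq_false_iff_ne.mpr h14
  have e15 : (x == "jenkins") = false := beq_eq_false_iff_ne.mpr h15
  have e16 : (x == "machine learning") = false := beq_eq_false_iff_ne.mpr h16
  have e17 : (x == "ai") = false := beq_eq_false_iff_ne.mpr h17
  have e18 : (x == "data science") = false := beq_eq_false_iff_ne.mpr h18
  have e19 : (x == "tensorflow") = false := beq_eq_false_iff_ne.mpr h19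
  have e20 : (x == "pytorch") = false := beq_eq_false_iff_ne.mpr h20
  rw [getD_skillMasks]
  simp only [e0, e1, e2, e3, e4, e5, e6, e7, e8, e9, e10, e11, e12, e13, e14, e15, e16, e17, e18, e19, e20, Bool.false_eq_true, ite_false, Nat.zero_testBit, Bool.or_self]

theorem maskBit1 (x : String) : ((skillMasks.getD x 0).testBit 1) =
    (x == "python" || x == "java" || x == "node.js" || x == "sql" || x == "postgresql") := by
  by_cases h0 : x = "react"
  · subst h0; decide
  by_cases h1 : x = "angular"
  · subst h1; decide
  by_cases h2 : x = "vue.js"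
  · subst h2; decide
  by_cases h3 : x = "html"
  · subst h3; decide
  by_cases h4 : x = "css"
  · subst h4; decide
  by_cases h5 : x = "javascript"
  · subst h5; decide
  by_cases h6 : x = "python"
  · subst h6; decide
  by_cases h7 : x = "java"
  · subst h7; decide
  by_cases h8 : x = "node.js"
  · subst h8; decide
  by_cases h9 : x = "sql"
  · subst h9; decide
  by_cases h10 : x = "postgresql"
  · subst h10; decide
  by_cases h11 : x = "aws"
  · subst h11; decide
  by_cases h12 : x = "azure"
  · subst h12; decide
  by_cases h13 : x = "docker"
  · subst h13; decide
  by_cases h14 : x = "kubernetes"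
  · subst h14; decide
  by_cases h15 : x = "jenkins"
  · subst h15; decide
  by_cases h16 : x = "machine learning"
  · subst h16; decide
  by_cases h17 : x = "ai"
  · subst h17; decide
  by_cases h18 : x = "data science"
  · subst h18; decide
  by_cases h19 : x = "tensorflow"
  · subst h19; decide
  by_cases h20 : x = "pytorch"
  · subst h20; decide
  have e0 : (x == "react") = false := beq_eq_false_iff_ne.mpr h0
  have e1 : (x == "angular") = false := beq_eq_false_iff_ne.mpr h1
  have e2 : (x == "vue.js") = false := beq_eq_false_iff_ne.mpr h2
  have e3 : (x == "html") = false := beq_eq_false_iff_ne.mpr h3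
  have e4 : (x == "css") = false := beq_eq_false_iff_ne.mpr h4
  have e5 : (x == "javascript") = false := beq_eq_false_iff_ne.mpr h5
  have e6 : (x == "python") = false := beq_eq_false_iff_ne.mpr h6
  have e7 : (x == "java") = false := beq_eq_false_iff_ne.mpr h7
  have e8 : (x == "node.js") = false := beq_eq_false_iff_ne.mpr h8
  have e9 : (x == "sql") = false := beq_eq_false_iff_ne.mpr h9
  have e10 : (x == "postgresql") = false := beq_eq_false_iff_ne.mpr h10
  have e11 : (x == "aws") = false := beq_eq_false_iff_ne.mpr h11
  have e12 : (x == "azure") = false := beq_eq_false_iff_ne.mpr h12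
  have e13 : (x == "docker") = false := beq_eq_false_iff_ne.mpr h13
  have e14 : (x == "kubernetes") = false := beq_eq_false_iff_ne.mpr h14
  have e15 : (x == "jenkins") = false := beq_eq_false_iff_ne.mpr h15
  have e16 : (x == "machine learning") = false := beq_eq_false_iff_ne.mpr h16
  have e17 : (x == "ai") = false := beq_eq_false_iff_ne.mpr h17
  have e18 : (x == "data science") = false := beq_eq_false_iff_ne.mpr h18
  have e19 : (x == "tensorflow") = false := beq_eq_false_iff_ne.mpr h19
  have e20 : (x == "pytorch") = false := beq_eq_false_iff_ne.mpr h20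
  rw [getD_skillMasks]
  simp only [e0, e1, e2, e3, e4, e5, e6, e7, e8, e9, e10, e11, e12, e13, e14, e15, e16, e17, e18, e19, e20, Bool.false_eq_true, ite_false, Nat.zero_testBit, Bool.or_self]

theorem maskBit2 (x : String) : ((skillMasks.getD x 0).testBit 2) =
    (x == "react" || x == "angular") := by
  by_cases h0 : x = "react"
  · subst h0; decide
  by_cases h1 : x = "angular"
  · subst h1; decide
  by_cases h2 : x = "vue.js"
  · subst h2; decide
  by_cases h3 : x = "html"
  · subst h3; decide
  by_cases h4 : x = "css"
  · subst h4; decide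
  by_cases h5 : x = "javascript"
  · subst h5; decide
  by_cases h6 : x = "python"
  · subst h6; decide
  by_cases h7 : x = "java"
  · subst h7; decide
  by_cases h8 : x = "node.js"
  · subst h8; decide
  by_cases h9 : x = "sql"
  · subst h9; decide
  by_cases h10 : x = "postgresql"
  · subst h10; decide
  by_cases h11 : x = "aws"
  · subst h11; decide
  by_cases h12 : x = "azure"
  · subst h12; decide
  by_cases h13 : x = "docker"
  · subst h13; decide
  by_cases h14 : x = "kubernetes"
  · subst h14; decide
  by_cases h15 : x = "jenkins"
  · subst h15; decide
  by_cases h16 : x = "machine learning"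
  · subst h16; decide
  by_cases h17 : x = "ai"
  · subst h17; decide
  by_cases h18 : x = "data science"
  · subst h18; decide
  by_cases h19 : x = "tensorflow"
  · subst h19; decide
  by_cases h20 : x = "pytorch"
  · subst h20; decide
  have e0 : (x == "react") = false := beq_eq_false_iff_ne.mpr h0
  have e1 : (x == "angular") = false := beq_eq_false_iff_ne.mpr h1
  have e2 : (x == "vue.js") = false := beq_eq_false_iff_ne.mpr h2
  have e3 : (x == "html") = false := beq_eq_false_iff_ne.mpr h3
  have e4 : (x == "css") = false := beq_eq_false_iff_ne.mpr h4
  have e5 : (x == "javascript") = false := beq_eq_false_iff_ne.mpr h5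
  have e6 : (x == "python") = false := beq_eq_false_iff_ne.mpr h6
  have e7 : (x == "java") = false := beq_eq_false_iff_ne.mpr h7
  have e8 : (x == "node.js") = false := beq_eq_false_iff_ne.mpr h8
  have e9 : (x == "sql") = false := beq_eq_false_iff_ne.mpr h9
  have e10 : (x == "postgresql") = false := beq_eq_false_iff_ne.mpr h10
  have e11 : (x == "aws") = false := beq_eq_false_iff_ne.mpr h11
  have e12 : (x == "azure") = false := beq_eq_false_iff_ne.mpr h12
  have e13 : (x == "docker") = false := beq_eq_false_iff_ne.mpr h13
  have e14 : (x == "kubernetes") = false := beq_eq_false_iff_ne.mpr h14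
  have e15 : (x == "jenkins") = false := beq_eq_false_iff_ne.mpr h15
  have e16 : (x == "machine learning") = false := beq_eq_false_iff_ne.mpr h16
  have e17 : (x == "ai") = false := beq_eq_false_iff_ne.mpr h17
  have e18 : (x == "data science") = false := beq_eq_false_iff_ne.mpr h18
  have e19 : (x == "tensorflow") = false := beq_eq_false_iff_ne.mpr h19
  have e20 : (x == "pytorch") = false := beq_eq_false_iff_ne.mpr h20
  rw [getD_skillMasks]
  simp only [e0, e1, e2, e3, e4, e5, e6, e7, e8, e9, e10, e11, e12, e13, e14, e15, e16, e17, e18, e19, e20, Bool.false_eq_true, ite_false, Nat.zero_testBit, Bool.or_self]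

theorem maskBit3 (x : String) : ((skillMasks.getD x 0).testBit 3) =
    (x == "python" || x == "java" || x == "node.js") := by
  by_cases h0 : x = "react"
  · subst h0; decide
  by_cases h1 : x = "angular"
  · subst h1; decide
  by_cases h2 : x = "vue.js"
  · subst h2; decide
  by_cases h3 : x = "html"
  · subst h3; decide
  by_cases h4 : x = "css"
  · subst h4; decide
  by_cases h5 : x = "javascript"
  · subst h5; decide
  by_cases h6 : x = "python"
  · subst h6; decide
  by_cases h7 : x = "java"
  · subst h7; decide
  by_cases h8 : x = "node.js"
  · subst h8; decide
  by_cases h9 : x = "sql"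
  · subst h9; decide
  by_cases h10 : x = "postgresql"
  · subst h10; decide
  by_cases h11 : x = "aws"
  · subst h11; decide
  by_cases h12 : x = "azure"
  · subst h12; decide
  by_cases h13 : x = "docker"
  · subst h13; decide
  by_cases h14 : x = "kubernetes"
  · subst h14; decide
  by_cases h15 : x = "jenkins"
  · subst h15; decide
  by_cases h16 : x = "machine learning"
  · subst h16; decide
  by_cases h17 : x = "ai"
  · subst h17; decide
  by_cases h18 : x = "data science"
  · subst h18; decide
  by_cases h19 : x = "tensorflow"
  · subst h19; decide
  by_cases h20 : x = "pytorch"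
  · subst h20; decide
  have e0 : (x == "react") = false := beq_eq_false_iff_ne.mpr h0
  have e1 : (x == "angular") = false := beq_eq_false_iff_ne.mpr h1
  have e2 : (x == "vue.js") = false := beq_eq_false_iff_ne.mpr h2
  have e3 : (x == "html") = false := beq_eq_false_iff_ne.mpr h3
  have e4 : (x == "css") = false := beq_eq_false_iff_ne.mpr h4
  have e5 : (x == "javascript") = false := beq_eq_false_iff_ne.mpr h5
  have e6 : (x == "python") = false := beq_eq_false_iff_ne.mpr h6
  have e7 : (x == "java") = false := beq_eq_false_iff_ne.mpr h7
  have e8 : (x == "node.js") = false := beq_eq_false_iff_ne.mpr h8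
  have e9 : (x == "sql") = false := beq_eq_false_iff_ne.mpr h9
  have e10 : (x == "postgresql") = false := beq_eq_false_iff_ne.mpr h10
  have e11 : (x == "aws") = false := beq_eq_false_iff_ne.mpr h11
  have e12 : (x == "azure") = false := beq_eq_false_iff_ne.mpr h12
  have e13 : (x == "docker") = false := beq_eq_false_iff_ne.mpr h13
  have e14 : (x == "kubernetes") = false := beq_eq_false_iff_ne.mpr h14
  have e15 : (x == "jenkins") = false := beq_eq_false_iff_ne.mpr h15
  have e16 : (x == "machine learning") = false := beq_eq_false_iff_ne.mpr h16
  have e17 : (x == "ai") = false := beq_eq_false_iff_ne.mpr h17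
  have e18 : (x == "data science") = false := beq_eq_false_iff_ne.mpr h18
  have e19 : (x == "tensorflow") = false := beq_eq_false_iff_ne.mpr h19
  have e20 : (x == "pytorch") = false := beq_eq_false_iff_ne.mpr h20
  rw [getD_skillMasks]
  simp only [e0, e1, e2, e3, e4, e5, e6, e7, e8, e9, e10, e11, e12, e13, e14, e15, e16, e17, e18, e19, e20, Bool.false_eq_true, ite_false, Nat.zero_testBit, Bool.or_self]

theorem maskBit4 (x : String) : ((skillMasks.getD x 0).testBit 4) =
    (x == "aws" || x == "azure" || x == "docker" || x == "kubernetes" || x == "jenkins") := by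
  by_cases h0 : x = "react"
  · subst h0; decide
  by_cases h1 : x = "angular"
  · subst h1; decide
  by_cases h2 : x = "vue.js"
  · subst h2; decide
  by_cases h3 : x = "html"
  · subst h3; decide
  by_cases h4 : x = "css"
  · subst h4; decide
  by_cases h5 : x = "javascript"
  · subst h5; decide
  by_cases h6 : x = "python"
  · subst h6; decide
  by_cases h7 : x = "java"
  · subst h7; decide
  by_cases h8 : x = "node.js"
  · subst h8; decide
  by_cases h9 : x = "sql"
  · subst h9; decide
  by_cases h10 : x = "postgresql"
  · subst h10; decide
  by_cases h11 : x = "aws"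
  · subst h11; decide
  by_cases h12 : x = "azure"
  · subst h12; decide
  by_cases h13 : x = "docker"
  · subst h13; decide
  by_cases h14 : x = "kubernetes"
  · subst h14; decide
  by_cases h15 : x = "jenkins"
  · subst h15; decide
  by_cases h16 : x = "machine learning"
  · subst h16; decide
  by_cases h17 : x = "ai"
  · subst h17; decide
  by_cases h18 : x = "data science"
  · subst h18; decide
  by_cases h19 : x = "tensorflow"
  · subst h19; decide
  by_cases h20 : x = "pytorch"
  · subst h20; decide
  have e0 : (x == "react") = false := beq_eq_false_iff_ne.mpr h0
  have e1 : (x == "angular") = false := beq_eq_false_iff_ne.mpr h1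
  have e2 : (x == "vue.js") = false := beq_eq_false_iff_ne.mpr h2
  have e3 : (x == "html") = false := beq_eq_false_iff_ne.mpr h3
  have e4 : (x == "css") = false := beq_eq_false_iff_ne.mpr h4
  have e5 : (x == "javascript") = false := beq_eq_false_iff_ne.mpr h5
  have e6 : (x == "python") = false := beq_eq_false_iff_ne.mpr h6
  have e7 : (x == "java") = false := beq_eq_false_iff_ne.mpr h7
  have e8 : (x == "node.js") = false := beq_eq_false_iff_ne.mpr h8
  have e9 : (x == "sql") = false := beq_eq_false_iff_ne.mpr h9
  have e10 : (x == "postgresql") = false := beq_eq_false_iff_ne.mpr h10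
  have e11 : (x == "aws") = false := beq_eq_false_iff_ne.mpr h11
  have e12 : (x == "azure") = false := beq_eq_false_iff_ne.mpr h12
  have e13 : (x == "docker") = false := beq_eq_false_iff_ne.mpr h13
  have e14 : (x == "kubernetes") = false := beq_eq_false_iff_ne.mpr h14
  have e15 : (x == "jenkins") = false := beq_eq_false_iff_ne.mpr h15
  have e16 : (x == "machine learning") = false := beq_eq_false_iff_ne.mpr h16
  have e17 : (x == "ai") = false := beq_eq_false_iff_ne.mpr h17
  have e18 : (x == "data science") = false := beq_eq_false_iff_ne.mpr h18
  have e19 : (x == "tensorflow") = false := beq_eq_false_iff_ne.mpr h19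
  have e20 : (x == "pytorch") = false := beq_eq_false_iff_ne.mpr h20
  rw [getD_skillMasks]
  simp only [e0, e1, e2, e3, e4, e5, e6, e7, e8, e9, e10, e11, e12, e13, e14, e15, e16, e17, e18, e19, e20, Bool.false_eq_true, ite_false, Nat.zero_testBit, Bool.or_self]

theorem maskBit5 (x : String) : ((skillMasks.getD x 0).testBit 5) =
    (x == "machine learning" || x == "ai" || x == "data science" || x == "tensorflow" || x == "pytorch") := by
  by_cases h0 : x = "react"
  · subst h0; decide
  by_cases h1 : x = "angular"
  · subst h1; decide
  by_cases h2 : x = "vue.js"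
  · subst h2; decide
  by_cases h3 : x = "html"
  · subst h3; decide
  by_cases h4 : x = "css"
  · subst h4; decide
  by_cases h5 : x = "javascript"
  · subst h5; decide
  by_cases h6 : x = "python"
  · subst h6; decide
  by_cases h7 : x = "java"
  · subst h7; decide
  by_cases h8 : x = "node.js"
  · subst h8; decide
  by_cases h9 : x = "sql"
  · subst h9; decide
  by_cases h10 : x = "postgresql"
  · subst h10; decide
  by_cases h11 : x = "aws"
  · subst h11; decide
  by_cases h12 : x = "azure"
  · subst h12; decide
  by_cases h13 : x = "docker"
  · subst h13; decide
  by_cases h14 : x = "kubernetes"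
  · subst h14; decide
  by_cases h15 : x = "jenkins"
  · subst h15; decide
  by_cases h16 : x = "machine learning"
  · subst h16; decide
  by_cases h17 : x = "ai"
  · subst h17; decide
  by_cases h18 : x = "data science"
  · subst h18; decide
  by_cases h19 : x = "tensorflow"
  · subst h19; decide
  by_cases h20 : x = "pytorch"
  · subst h20; decide
  have e0 : (x == "react") = false := beq_eq_false_iff_ne.mpr h0
  have e1 : (x == "angular") = false := beq_eq_false_iff_ne.mpr h1
  have e2 : (x == "vue.js") = false := beq_eq_false_iff_ne.mpr h2
  have e3 : (x == "html") = false := beq_eq_false_iff_ne.mpr h3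
  have e4 : (x == "css") = false := beq_eq_false_iff_ne.mpr h4
  have e5 : (x == "javascript") = false := beq_eq_false_iff_ne.mpr h5
  have e6 : (x == "python") = false := beq_eq_false_iff_ne.mpr h6
  have e7 : (x == "java") = false := beq_eq_false_iff_ne.mpr h7
  have e8 : (x == "node.js") = false := beq_eq_false_iff_ne.mpr h8
  have e9 : (x == "sql") = false := beq_eq_false_iff_ne.mpr h9
  have e10 : (x == "postgresql") = false := beq_eq_false_iff_ne.mpr h10
  have e11 : (x == "aws") = false := beq_eq_false_iff_ne.mpr h11
  have e12 : (x == "azure") = false := beq_eq_false_iff_ne.mpr h12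
  have e13 : (x == "docker") = false := beq_eq_false_iff_ne.mpr h13
  have e14 : (x == "kubernetes") = false := beq_eq_false_iff_ne.mpr h14
  have e15 : (x == "jenkins") = false := beq_eq_false_iff_ne.mpr h15
  have e16 : (x == "machine learning") = false := beq_eq_false_iff_ne.mpr h16
  have e17 : (x == "ai") = false := beq_eq_false_iff_ne.mpr h17
  have e18 : (x == "data science") = false := beq_eq_false_iff_ne.mpr h18
  have e19 : (x == "tensorflow") = false := beq_eq_false_iff_ne.mpr h19
  have e20 : (x == "pytorch") = false := beq_eq_false_iff_ne.mpr h20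
  rw [getD_skillMasks]
  simp only [e0, e1, e2, e3, e4, e5, e6, e7, e8, e9, e10, e11, e12, e13, e14, e15, e16, e17, e18, e19, e20, Bool.false_eq_true, ite_false, Nat.zero_testBit, Bool.or_self]

-- bit i of the OR-fold = some element contributes bit i
theorem testBit_foldl_or (l : List String) (f : String → Nat) (a : Nat) (i : Nat) :
    ((l.foldl (fun m s => m ||| f s) a).testBit i) = (a.testBit i || l.any (fun s => (f s).testBit i)) := by
  induction l generalizing a with
  | nil => simp
  | cons x xs ih => simp [List.foldl_cons, ih, Nat.testBit_or, Bool.or_assoc]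

-- m &&& 2^k == 2^k tests a single bit
theorem and_pow_eq (m k : Nat) : (m &&& 2 ^ k == 2 ^ k) = m.testBit k := by
  cases h : m.testBit k
  · rw [Nat.and_two_pow, h]
    simpa using (Nat.two_pow_pos k).ne
  · rw [Nat.and_two_pow, h]; simp

-- the two-bit requirement 12 = 2^2 ||| 2^3 tests bits 2 and 3
theorem and_twelve_eq (m : Nat) : (m &&& 12 == 12) = (m.testBit 2 && m.testBit 3) := by
  have d2 : Nat.testBit 12 2 = true := by decide
  have d3 : Nat.testBit 12 3 = true := by decide
  by_cases he : m &&& 12 = 12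
  · have t2 : m.testBit 2 = true := by
      have h := congrArg (fun x => Nat.testBit x 2) he
      simp only [Nat.testBit_and, d2, Bool.and_true] at h; exact h
    have t3 : m.testBit 3 = true := by
      have h := congrArg (fun x => Nat.testBit x 3) he
      simp only [Nat.testBit_and, d3, Bool.and_true] at h; exact h
    simp [he, t2, t3]
  · have hb : (m &&& 12 == 12) = false := beq_eq_false_iff_ne.mpr he
    have hs : ¬(m.testBit 2 = true ∧ m.testBit 3 = true) := by
      rintro ⟨t2, t3⟩
      apply he
      apply Nat.eq_of_testBit_eq; intro i
      rw [Nat.testBit_and]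
      by_cases hi2 : i = 2
      · subst hi2; simp [t2]
      by_cases hi3 : i = 3
      · subst hi3; simp [t3]
      have hz : (12 : Nat).testBit i = false := by
        have hor : (12 : Nat) = 2 ^ 2 ||| 2 ^ 3 := by decide
        rw [hor, Nat.testBit_or, Nat.testBit_two_pow, Nat.testBit_two_pow]
        simp [Ne.symm hi2, Ne.symm hi3]
      simp [hz]
    rw [hb]
    cases hm2 : m.testBit 2 <;> cases hm3 : m.testBit 3 <;> simp_all

-- == on String is symmetric
theorem str_beq_symm (a b : String) : (a == b) = (b == a) := by
  by_cases h : a = b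
  · subst h; rfl
  · rw [beq_eq_false_iff_ne.mpr h, beq_eq_false_iff_ne.mpr (Ne.symm h)]

-- contains on the lowered list is an any over the original list
theorem contains_map_lower (skills : List String) (t : String) :
    ((skills.map PySem.Str.lower).contains t) = skills.any (fun s => PySem.Str.lower s == t) := by
  induction skills with
  | nil => rfl
  | cons x xs ih => simp only [List.map_cons, List.contains_cons, List.any_cons, ih, str_beq_symm]

-- any distributes over pointwise or
theorem any_or_distrib {α : Type} (l : List α) (p q : α → Bool) :
    (l.any fun a => p a || q a) = (l.any p || l.any q) := by
  induction l with
  | nil => rfl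
  | cons x xs ih => cases hp : p x <;> cases hq : q x <;> simp [List.any_cons, hp, hq, ih]

-- ===== VERDICT (by name: the statement is the Claim_ definition above) =====
set_option maxHeartbeats 4000000 in
theorem infer_roles_from_skills_spec : Claim_equal_infer_roles_from_skills := by
  intro skills _
  unfold Spec_infer_roles_from_skills infer_roles_from_skills infer_roles_from_skills_alt roleReqs
  simp only [List.filterMap_cons, List.filterMap_nil]
  have hb0 : ((skills.foldl (fun m s => m ||| skillMasks.getD (PySem.Str.lower s) 0) 0) &&& 1 == 1)
      = (skills.foldl (fun m s => m ||| skillMasks.getD (PySem.Str.lower s) 0) 0).testBit 0 := by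
    simpa only [pow_zero] using and_pow_eq (skills.foldl (fun m s => m ||| skillMasks.getD (PySem.Str.lower s) 0) 0) 0
  have hb1 : ((skills.foldl (fun m s => m ||| skillMasks.getD (PySem.Str.lower s) 0) 0) &&& 2 == 2)
      = (skills.foldl (fun m s => m ||| skillMasks.getD (PySem.Str.lower s) 0) 0).testBit 1 := by
    simpa only [pow_one] using and_pow_eq (skills.foldl (fun m s => m ||| skillMasks.getD (PySem.Str.lower s) 0) 0) 1
  have hb4 : ((skills.foldl (fun m s => m ||| skillMasks.getD (PySem.Str.lower s) 0) 0) &&& 16 == 16)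
      = (skills.foldl (fun m s => m ||| skillMasks.getD (PySem.Str.lower s) 0) 0).testBit 4 := by
    have h := and_pow_eq (skills.foldl (fun m s => m ||| skillMasks.getD (PySem.Str.lower s) 0) 0) 4
    norm_num at h; exact h
  have hb5 : ((skills.foldl (fun m s => m ||| skillMasks.getD (PySem.Str.lower s) 0) 0) &&& 32 == 32)
      = (skills.foldl (fun m s => m ||| skillMasks.getD (PySem.Str.lower s) 0) 0).testBit 5 := by
    have h := and_pow_eq (skills.foldl (fun m s => m ||| skillMasks.getD (PySem.Str.lower s) 0) 0) 5
    norm_num at h; exact h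
  have h12 := and_twelve_eq (skills.foldl (fun m s => m ||| skillMasks.getD (PySem.Str.lower s) 0) 0)
  simp only [hb0, hb1, hb4, hb5, h12,
    testBit_foldl_or skills (fun s => skillMasks.getD (PySem.Str.lower s) 0),
    Nat.zero_testBit, Bool.false_or,
    maskBit0, maskBit1, maskBit2, maskBit3, maskBit4, maskBit5,
    List.any_cons, List.any_nil, contains_map_lower, Bool.or_false,
    any_or_distrib, Bool.or_assoc]
  generalize ((skills.any fun s => PySem.Str.lower s == "react") || ((skills.any fun s => PySem.Str.lower s == "angular") || ((skills.any fun s => PySem.Str.lower s == "vue.js") || ((skills.any fun s => PySem.Str.lower s == "html") || ((skills.any fun s => PySem.Str.lower s == "css") || (skills.any fun s => PySem.Str.lower s == "javascript")))))) = b1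
  generalize ((skills.any fun s => PySem.Str.lower s == "python") || ((skills.any fun s => PySem.Str.lower s == "java") || ((skills.any fun s => PySem.Str.lower s == "node.js") || ((skills.any fun s => PySem.Str.lower s == "sql") || (skills.any fun s => PySem.Str.lower s == "postgresql"))))) = b2
  generalize ((skills.any fun s => PySem.Str.lower s == "react") || (skills.any fun s => PySem.Str.lower s == "angular")) = b3
  generalize ((skills.any fun s => PySem.Str.lower s == "python") || ((skills.any fun s => PySem.Str.lower s == "java") || (skills.any fun s => PySem.Str.lower s == "node.js"))) = b4
  generalize ((skills.any fun s => PySem.Str.lower s == "aws") || ((skills.any fun s => PySem.Str.lower s == "azure") || ((skills.any fun s => PySem.Str.lower s == "docker") || ((skills.any fun s => PySem.Str.lower s == "kubernetes") || (skills.any fun s => PySem.Str.lower s == "jenkins"))))) = b5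
  generalize ((skills.any fun s => PySem.Str.lower s == "machine learning") || ((skills.any fun s => PySem.Str.lower s == "ai") || ((skills.any fun s => PySem.Str.lower s == "data science") || ((skills.any fun s => PySem.Str.lower s == "tensorflow") || (skills.any fun s => PySem.Str.lower s == "pytorch"))))) = b6
  cases b1 <;> cases b2 <;> cases b3 <;> cases b4 <;> cases b5 <;> cases b6 <;> rfl
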